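-- pv_equiv track=rewrite | github.com/joshua9tamu/audio-transcription | app.py | render_tokens
-- ===== SOURCE A (Python) =====
-- def render_tokens(tokens):
--     if not tokens:
--         return ""
--
--     text_parts = []
--     current_speaker = None
--
--     for token in tokens:
--         text = token.get("text", "")
--         speaker = token.get("speaker")
--
--         if speaker is not None and speaker != current_speaker:
--             if current_speaker is not None:
--                 text_parts.append("\n\n")
--             current_speaker = speaker
--             text_parts.append(f"[Speaker {speaker}]: ")
--
--         text_parts.append(text)
--
--     return "".join(text_parts).strip()
-- ===== SOURCE B (Python) =====
-- def render_tokens(tokens):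
--     # Pass 1: forward-fill an "effective speaker" for every token
--     # (a token without a speaker belongs to the most recent speaker, None until one appears).
--     eff = []
--     cur = None
--     for token in tokens:
--         sp = token.get("speaker")
--         if sp is not None:
--             cur = sp
--         eff.append((cur, token.get("text", "")))
--
--     # Pass 2: group consecutive tokens with the same effective speaker.
--     groups = []
--     for sp, text in eff:
--         if groups and groups[-1][0] == sp:
--             groups[-1][1].append(text)
--         else:
--             groups.append((sp, [text]))
--
--     # Pass 3: render each run; labeled runs get a header, separated by blank lines.
--     out = []
--     seen = False
--     for sp, texts in groups:
--         if sp is not None: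
--             if seen:
--                 out.append("\n\n")
--             out.append("[Speaker {}]: ".format(sp))
--             seen = True
--         out.extend(texts)
--     return "".join(out).strip()
-- ===== Notes on version B (the rewrite author's own statement) =====
-- stated objective: alternative
-- what changed: Replaces A's single-pass speaker-change state machine with a three-pass group-then-render decomposition: forward-fill an effective speaker per token, group consecutive tokens by effective speaker, then render each run with a header for labeled runs.
import Mathlib
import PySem

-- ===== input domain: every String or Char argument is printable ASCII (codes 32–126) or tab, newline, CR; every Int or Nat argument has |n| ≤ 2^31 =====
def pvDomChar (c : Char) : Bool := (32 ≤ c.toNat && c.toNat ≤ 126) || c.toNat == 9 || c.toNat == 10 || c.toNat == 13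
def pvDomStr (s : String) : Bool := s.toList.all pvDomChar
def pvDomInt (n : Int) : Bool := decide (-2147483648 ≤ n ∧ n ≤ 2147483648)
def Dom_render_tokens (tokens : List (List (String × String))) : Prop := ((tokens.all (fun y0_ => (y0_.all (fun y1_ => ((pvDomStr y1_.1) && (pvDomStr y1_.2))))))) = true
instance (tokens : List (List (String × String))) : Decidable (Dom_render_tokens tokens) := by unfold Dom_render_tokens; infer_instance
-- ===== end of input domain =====

-- B replaces A's incremental speaker-change state machine by a three-pass group-then-render
-- decomposition (forward-fill effective speakers, group consecutive runs, render the runs);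
-- objective: alternative structure, same cost.

-- ===== PORT A =====
-- the body of A's for-loop, acting on the state (text_parts, current_speaker)
def aStep (st : List String × Option String) (token : List (String × String)) :
    List String × Option String :=
  let text := PySem.Dict.getD (⟨token⟩ : PySem.Dict String String) "text" ""
  let speaker := PySem.Dict.get? (⟨token⟩ : PySem.Dict String String) "speaker"
  let st :=
    match speaker with
    | some s =>
        if some s ≠ st.2 then
          ((st.1 ++ (if st.2 ≠ none then ["\n\n"] else [])) ++ ["[Speaker " ++ s ++ "]: "], some s)
        else st
    | none => st
  (st.1 ++ [text], st.2)

def render_tokens (tokens : List (List (String × String))) : String :=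
  if tokens = [] then ""
  else
    let st := tokens.foldl aStep ([], none)
    PySem.Str.strip (PySem.Str.join "" st.1)

-- ===== PORT B =====
-- pass 1 loop body: forward-fill the effective speaker
def fillStep (st : List (Option String × String) × Option String)
    (token : List (String × String)) : List (Option String × String) × Option String :=
  let sp := PySem.Dict.get? (⟨token⟩ : PySem.Dict String String) "speaker"
  let cur := match sp with | some s => some s | none => st.2
  (st.1 ++ [(cur, PySem.Dict.getD (⟨token⟩ : PySem.Dict String String) "text" "")], cur)

-- pass 2 loop body: append to the last group if the effective speaker matches, else open a group
def groupStep (gs : List (Option String × List String)) (p : Option String × String) :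
    List (Option String × List String) :=
  match gs.getLast? with
  | some g => if g.1 = p.1 then gs.dropLast ++ [(g.1, g.2 ++ [p.2])] else gs ++ [(p.1, [p.2])]
  | none => [(p.1, [p.2])]

-- pass 3 loop body: render one run, labeled runs get a header ('seen' = a header was output)
def renderStep (st : List String × Bool) (g : Option String × List String) :
    List String × Bool :=
  match g.1 with
  | some s => ((st.1 ++ (if st.2 then ["\n\n"] else [])) ++ ("[Speaker " ++ s ++ "]: ") :: g.2, true)
  | none => (st.1 ++ g.2, st.2)

def render_tokens_alt (tokens : List (List (String × String))) : String :=
  let eff := (tokens.foldl fillStep ([], none)).1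
  let groups := eff.foldl groupStep []
  let out := (groups.foldl renderStep ([], false)).1
  PySem.Str.strip (PySem.Str.join "" out)

-- ===== PRECONDITION & SPEC =====
def Spec_render_tokens (tokens : List (List (String × String))) (out : String) : Prop := out = render_tokens_alt tokens
instance (tokens : List (List (String × String))) (out : String) : Decidable (Spec_render_tokens tokens out) := by unfold Spec_render_tokens; infer_instance

-- ===== CLAIM (what is proved, stated in full; the proofs are below) =====
def Claim_equal_render_tokens : Prop := ∀ (tokens : List (List (String × String))), Dom_render_tokens tokens → Spec_render_tokens tokens (render_tokens tokens)

-- ===== LEMMAS AND PROOFS =====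

-- "".join of a list of strings, as a list of chars
def catS (vs : List String) : List Char := (vs.map String.toList).flatten

theorem join_empty_sep (parts : List String) :
    (PySem.Str.join "" parts).toList = catS parts := by
  rw [PySem.Str.toList_join]
  unfold catS
  induction parts with
  | nil => simp [PySem.Chars.join_nil]
  | cons a l ih =>
    cases l with
    | nil => simp [PySem.Chars.join_singleton]
    | cons b t =>
      simp only [List.map_cons] at ih ⊢
      rw [PySem.Chars.join_cons_cons] at *
      simp_all

-- A's loop as a structural recursion producing the concatenated characters
def aloop : List (List (String × String)) → Option String → List Char
  | [], _ => []
  | token :: ts, cur =>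
    let text := (PySem.Dict.getD (⟨token⟩ : PySem.Dict String String) "text" "").toList
    match PySem.Dict.get? (⟨token⟩ : PySem.Dict String String) "speaker" with
    | some s =>
        if some s ≠ cur then
          (if cur ≠ none then "\n\n".toList else []) ++ ("[Speaker " ++ s ++ "]: ").toList
            ++ text ++ aloop ts (some s)
        else text ++ aloop ts cur
    | none => text ++ aloop ts cur

theorem aloop_foldl (ts : List (List (String × String))) :
    ∀ parts cur, catS (ts.foldl aStep (parts, cur)).1 = catS parts ++ aloop ts cur := by
  induction ts with
  | nil => intro parts cur; simp [aloop]
  | cons t ts ih =>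
    intro parts cur
    simp only [List.foldl_cons, aStep, aloop]
    cases h : PySem.Dict.get? (⟨t⟩ : PySem.Dict String String) "speaker" with
    | none => rw [ih]; simp [catS]
    | some s =>
      rw [ih]
      by_cases hs : some s = cur
      · simp [hs, catS]
      · cases cur <;> simp [hs, catS]

-- forward-fill as a structural recursion
def fillR : List (List (String × String)) → Option String → List (Option String × String)
  | [], _ => []
  | t :: ts, cur =>
    let eff := match PySem.Dict.get? (⟨t⟩ : PySem.Dict String String) "speaker" with | some s => some s | none => cur
    (eff, PySem.Dict.getD (⟨t⟩ : PySem.Dict String String) "text" "") :: fillR ts eff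

theorem fillR_foldl (ts : List (List (String × String))) :
    ∀ acc cur, (ts.foldl fillStep (acc, cur)).1 = acc ++ fillR ts cur := by
  induction ts with
  | nil => intro acc cur; simp [fillR]
  | cons t ts ih =>
    intro acc cur
    simp only [List.foldl_cons, fillStep, fillR]
    cases h : PySem.Dict.get? (⟨t⟩ : PySem.Dict String String) "speaker" <;> simp [ih]

-- grouping of consecutive equal keys, built back-to-front (induction-friendly form)
def groupRuns : List (Option String × String) → List (Option String × List String)
  | [] => []
  | (k, v) :: l =>
    match groupRuns l with
    | [] => [(k, [v])]
    | (k', vs) :: gs => if k = k' then (k, v :: vs) :: gs else (k, [v]) :: (k', vs) :: gs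

theorem groupRuns_append (l : List (Option String × String)) (p : Option String × String) :
    groupRuns (l ++ [p]) = groupStep (groupRuns l) p := by
  induction l with
  | nil => simp [groupRuns, groupStep]
  | cons a l ih =>
    obtain ⟨k, v⟩ := a
    obtain ⟨pk, pv⟩ := p
    simp only [List.cons_append, groupRuns, ih]
    cases hR : groupRuns l with
    | nil =>
      simp only [groupStep, List.getLast?_nil]
      by_cases h1 : k = pk <;> simp [h1]
    | cons g0 gs0 =>
      obtain ⟨k0, vs0⟩ := g0
      cases gs0 with
      | nil =>
        by_cases h0 : k0 = pk
        · subst h0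
          by_cases h1 : k = k0 <;> simp [groupStep, h1]
        · by_cases h1 : k = k0 <;> simp [groupStep, h0, h1]
      | cons g1 gs1 =>
        cases hL : (g1 :: gs1).getLast? with
        | none => simp at hL
        | some g =>
          by_cases h2 : g.1 = pk <;> by_cases h1 : k = k0 <;>
            simp [groupStep, hL, h1, h2]
    
theorem groupRuns_foldl (l : List (Option String × String)) :
    l.foldl groupStep [] = groupRuns l := by
  induction l using List.reverseRecOn with
  | nil => simp [groupRuns]
  | append_singleton l p ih => rw [List.foldl_append, List.foldl_cons, List.foldl_nil, ih,
      groupRuns_append]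

-- B's render loop as a structural recursion producing the concatenated characters
def renderG : List (Option String × List String) → Bool → List Char
  | [], _ => []
  | (none, vs) :: gs, seen => catS vs ++ renderG gs seen
  | (some s, vs) :: gs, seen =>
    (if seen then "\n\n".toList else []) ++ ("[Speaker " ++ s ++ "]: ").toList
      ++ catS vs ++ renderG gs true

theorem renderG_foldl (gs : List (Option String × List String)) :
    ∀ acc seen, catS (gs.foldl renderStep (acc, seen)).1 = catS acc ++ renderG gs seen := by
  induction gs with
  | nil => intro acc seen; simp [renderG]
  | cons g gs ih =>
    intro acc seen
    obtain ⟨k, vs⟩ := g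
    cases k with
    | none => simp only [List.foldl_cons, renderStep, renderG]; rw [ih]; simp [catS]
    | some s =>
      simp only [List.foldl_cons, renderStep, renderG]
      rw [ih]
      cases seen <;> simp [catS]

-- A's output, computed over the grouped runs: 'cur' is the speaker A's state machine carries,
-- a run whose key equals 'cur' continues the current speaker without a header
def renderFrom : List (Option String × List String) → Option String → List Char
  | [], _ => []
  | (k, vs) :: gs, cur =>
    if k = cur then catS vs ++ renderFrom gs cur
    else
      match k with
      | none => catS vs ++ renderFrom gs cur
      | some s =>
        (if cur ≠ none then "\n\n".toList else []) ++ ("[Speaker " ++ s ++ "]: ").toList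
          ++ catS vs ++ renderFrom gs (some s)

theorem aloop_eq_renderFrom (ts : List (List (String × String))) :
    ∀ cur, aloop ts cur = renderFrom (groupRuns (fillR ts cur)) cur := by
  induction ts with
  | nil => intro cur; simp [aloop, fillR, groupRuns, renderFrom]
  | cons t ts ih =>
    intro cur
    cases hsp : PySem.Dict.get? (⟨t⟩ : PySem.Dict String String) "speaker" with
    | none =>
      -- effective speaker stays cur, no header
      simp only [aloop, fillR, hsp, groupRuns, ih cur]
      cases hR : groupRuns (fillR ts cur) with
      | nil => simp [renderFrom, catS]
      | cons g gs =>
        obtain ⟨k', vs⟩ := g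
        by_cases hk : cur = k'
        · subst hk; simp [renderFrom, catS]
        · cases k' with
          | none =>
            cases cur with
            | none => simp at hk
            | some c => simp [renderFrom, hk, catS]
          | some s' => simp [renderFrom, hk, catS]
    | some s =>
      by_cases hs : some s = cur
      · -- speaker equals the current one: no header
        subst hs
        simp only [aloop, fillR, hsp, groupRuns, ih (some s)]
        cases hR : groupRuns (fillR ts (some s)) with
        | nil => simp [renderFrom, catS]
        | cons g gs =>
          obtain ⟨k', vs⟩ := g
          by_cases hk : (some s : Option String) = k'
          · subst hk; simp [renderFrom, catS]
          · cases k' with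
            | none => simp [renderFrom, hk, catS]
            | some s' => simp [renderFrom, hk, catS]
      · -- new speaker: header
        simp only [aloop, fillR, hsp, groupRuns, ih (some s)]
        cases hR : groupRuns (fillR ts (some s)) with
        | nil => simp [renderFrom, hs, catS]
        | cons g gs =>
          obtain ⟨k', vs⟩ := g
          by_cases hk : (some s : Option String) = k'
          · subst hk; simp [renderFrom, hs, catS]
          · cases k' with
            | none => simp [renderFrom, hs, hk, catS]
            | some s' => simp [renderFrom, hs, hk, catS]

-- the runs renderFrom is applied to never repeat the running speaker at a labeled run
def okRuns : List (Option String × List String) → Option String → Prop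
  | [], _ => True
  | (none, _) :: gs, cur => okRuns gs cur
  | (some s, _) :: gs, cur => some s ≠ cur ∧ okRuns gs (some s)

theorem renderFrom_eq_renderG (gs : List (Option String × List String)) :
    ∀ cur, okRuns gs cur → renderFrom gs cur = renderG gs cur.isSome := by
  induction gs with
  | nil => intro cur _; simp [renderFrom, renderG]
  | cons g gs ih =>
    intro cur hok
    obtain ⟨k, vs⟩ := g
    cases k with
    | none =>
      simp only [okRuns] at hok
      cases cur with
      | none => simp [renderFrom, renderG, ih none hok]
      | some c => simp [renderFrom, renderG, ih (some c) hok]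
    | some s =>
      obtain ⟨hne, hok'⟩ := hok
      simp only [renderFrom, if_neg hne, renderG, ih (some s) hok']
      cases cur <;> simp

theorem okRuns_groupRuns_fillR (ts : List (List (String × String))) :
    ∀ cur, okRuns (groupRuns (fillR ts cur)) cur ∨
      (cur ≠ none ∧ ∃ vs gs, groupRuns (fillR ts cur) = (cur, vs) :: gs ∧ okRuns gs cur) := by
  induction ts with
  | nil => intro cur; left; simp [fillR, groupRuns, okRuns]
  | cons t ts ih =>
    intro cur
    cases hsp : PySem.Dict.get? (⟨t⟩ : PySem.Dict String String) "speaker" with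
    | none =>
      -- effective speaker stays cur
      simp only [fillR, hsp, groupRuns]
      rcases ih cur with hok | ⟨hcur, vs, gs, hR, hok⟩
      · cases hR : groupRuns (fillR ts cur) with
        | nil =>
          cases cur with
          | none => left; simp [okRuns]
          | some c =>
            right
            exact ⟨by simp, [PySem.Dict.getD (⟨t⟩ : PySem.Dict String String) "text" ""], [],
              by simp, trivial⟩
        | cons g gs0 =>
          obtain ⟨k', vs0⟩ := g
          rw [hR] at hok
          by_cases hk : cur = k'
          · -- merged into the first run
            subst hk
            cases cur with
            | none => left; simpa [okRuns] using hok
            | some c => simp [okRuns] at hok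
          · simp only [if_neg hk]
            cases cur with
            | none => left; simpa [okRuns] using hok
            | some c =>
              right
              exact ⟨by simp, [PySem.Dict.getD (⟨t⟩ : PySem.Dict String String) "text" ""],
                (k', vs0) :: gs0, by simp, hok⟩
      · -- IH right: head of groupRuns is the continuation run (cur, vs)
        simp only [hR]
        cases cur with
        | none => exact absurd rfl hcur
        | some c =>
          right
          exact ⟨hcur, _, gs, rfl, hok⟩
    | some s =>
      by_cases hs : (some s : Option String) = cur
      · -- speaker equals the current one: effective speaker is still some s
        rw [← hs]
        simp only [fillR, hsp, groupRuns]
        rcases ih (some s) with hok | ⟨_, vs, gs, hR, hok⟩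
        · cases hR : groupRuns (fillR ts (some s)) with
          | nil =>
            right
            exact ⟨by simp, [PySem.Dict.getD (⟨t⟩ : PySem.Dict String String) "text" ""], [],
              by simp, trivial⟩
          | cons g gs0 =>
            obtain ⟨k', vs0⟩ := g
            rw [hR] at hok
            by_cases hk : (some s : Option String) = k'
            · subst hk; simp [okRuns] at hok
            · simp only [if_neg hk]
              right
              exact ⟨by simp, [PySem.Dict.getD (⟨t⟩ : PySem.Dict String String) "text" ""],
                (k', vs0) :: gs0, by simp, hok⟩
        · simp only [hR]
          right
          exact ⟨by simp, _, gs, rfl, hok⟩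
      · -- new speaker: a fresh labeled run
        simp only [fillR, hsp, groupRuns]
        rcases ih (some s) with hok | ⟨_, vs, gs, hR, hok⟩
        · cases hR : groupRuns (fillR ts (some s)) with
          | nil => left; simp [okRuns, hs]
          | cons g gs0 =>
            obtain ⟨k', vs0⟩ := g
            rw [hR] at hok
            by_cases hk : (some s : Option String) = k'
            · subst hk; simp [okRuns] at hok
            · simp only [if_neg hk]
              left
              exact ⟨hs, hok⟩
        · simp only [hR]
          left
          exact ⟨hs, hok⟩

theorem toList_render_tokens_alt (tokens : List (List (String × String))) :
    (render_tokens_alt tokens).toList =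
      PySem.Chars.strip (renderG (groupRuns (fillR tokens none)) false) := by
  unfold render_tokens_alt
  rw [PySem.Str.toList_strip, join_empty_sep, renderG_foldl, fillR_foldl, groupRuns_foldl]
  simp [catS]

-- ===== VERDICT (by name: the statement is the Claim_ definition above) =====
theorem render_tokens_spec : Claim_equal_render_tokens := by
  intro tokens _
  unfold Spec_render_tokens
  apply String.toList_injective
  rw [toList_render_tokens_alt]
  have hok : okRuns (groupRuns (fillR tokens none)) none := by
    rcases okRuns_groupRuns_fillR tokens none with h | ⟨h, _⟩
    · exact h
    · exact absurd rfl h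
  have h2 := renderFrom_eq_renderG (groupRuns (fillR tokens none)) none hok
  simp only [Option.isSome_none] at h2
  rw [← h2, ← aloop_eq_renderFrom]
  unfold render_tokens
  by_cases h : tokens = []
  · subst h
    simp [aloop, PySem.Chars.strip, PySem.Chars.lstrip, PySem.Chars.rstrip]
  · rw [if_neg h, PySem.Str.toList_strip, join_empty_sep, aloop_foldl]
    simp [catS]
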